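-- pv_equiv track=rewrite | github.com/tnakaicode/jburkardt-python | walsh/walsh.py | i4_log_2
-- ===== SOURCE A (Python) =====
-- def i4_log_2 ( i ):
--
-- #*****************************************************************************80
-- #
-- ## I4_LOG_2 returns the integer part of the logarithm base 2 of |I|.
-- #
-- #  Discussion:
-- #
-- #    For positive I4_LOG_2(I), it should be true that
-- #      2^I4_LOG_2(X) <= |I| < 2^(I4_LOG_2(I)+1).
-- #    The special case of I4_LOG_2(0) returns -HUGE().
-- #
-- #  Example:
-- #
-- #     I  Value
-- #
-- #     0  -1
-- #     1,  0
-- #     2,  1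
-- #     3,  1
-- #     4,  2
-- #     5,  2
-- #     6,  2
-- #     7,  2
-- #     8,  3
-- #     9,  3
-- #    10,  3
-- #   127,  6
-- #   128,  7
-- #   129,  7
-- #
-- #  Licensing:
-- #
-- #    This code is distributed under the GNU LGPL license.
-- #
-- #  Modified:
-- #
-- #    08 May 2013
-- #
-- #  Author:
-- #
-- #    John Burkardt
-- #
-- #  Parameters:
-- #
-- #    Input, integer I, the number whose logarithm base 2 is desired.
-- #
-- #    Output, integer VALUE, the integer part of the logarithm base 2 of
-- #    the absolute value of I.
-- #
--   i = int ( i )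
--
--   if ( i == 0 ):
--
--     value = 0
--
--   else:
--
--     value = 0
--
--     i = abs ( i )
--
--     while ( 2 <= i ):
--       i = ( i // 2 )
--       value = value + 1
--
--   return value
-- ===== SOURCE B (Python) =====
-- def i4_log_2(i):
--     i = int(i)
--     if i == 0:
--         return 0
--     return abs(i).bit_length() - 1
-- ===== Notes on version B (the rewrite author's own statement) =====
-- stated objective: idiomatic
-- what changed: Replaces the halve-and-count while loop with a guarded closed form using int.bit_length (bit_length-1 = floor(log2)), keeping the explicit zero case.
import Mathlib
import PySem

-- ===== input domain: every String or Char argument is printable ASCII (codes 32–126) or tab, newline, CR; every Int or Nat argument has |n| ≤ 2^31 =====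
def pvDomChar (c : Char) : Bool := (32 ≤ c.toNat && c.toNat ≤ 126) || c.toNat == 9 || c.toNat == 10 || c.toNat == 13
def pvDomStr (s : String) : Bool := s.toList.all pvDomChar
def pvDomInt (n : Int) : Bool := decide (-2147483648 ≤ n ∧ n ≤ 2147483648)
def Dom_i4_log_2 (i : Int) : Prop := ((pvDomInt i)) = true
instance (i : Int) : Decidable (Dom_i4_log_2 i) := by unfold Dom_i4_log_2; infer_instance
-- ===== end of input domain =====

-- ===== PORT A =====
-- B changes: the while loop of A is replaced by a guarded closed form (bit_length - 1); objective: idiomatic.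
-- A's while loop: while 2 <= i: i //= 2; value += 1   (on i = abs(original))
def i4_log_2_loop (n : Nat) (value : Int) : Int :=
  if 2 ≤ n then i4_log_2_loop (n / 2) (value + 1) else value

def i4_log_2 (i : Int) : Int :=
  if i = 0 then 0 else i4_log_2_loop i.natAbs 0

-- ===== PORT B =====
-- abs(i).bit_length() - 1; bit_length of n ≥ 1 is Nat.log 2 n + 1 (exact for n ≥ 1)
def i4_log_2_alt (i : Int) : Int :=
  if i = 0 then 0 else ((Nat.log 2 i.natAbs + 1 : Int)) - 1

-- ===== PRECONDITION & SPEC =====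
def Spec_i4_log_2 (i : Int) (out : Int) : Prop := out = i4_log_2_alt i
instance (i : Int) (out : Int) : Decidable (Spec_i4_log_2 i out) := by unfold Spec_i4_log_2; infer_instance

-- ===== CLAIM (what is proved, stated in full; the proofs are below) =====
def Claim_equal_i4_log_2 : Prop := ∀ (i : Int), Dom_i4_log_2 i → Spec_i4_log_2 i (i4_log_2 i)

-- ===== LEMMAS AND PROOFS =====
theorem i4_log_2_loop_eq (n : Nat) : ∀ v : Int, i4_log_2_loop n v = v + Nat.log 2 n := by
  induction n using Nat.strong_induction_on with
  | _ n ih =>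
    intro v
    rw [i4_log_2_loop]
    by_cases h : 2 ≤ n
    · rw [if_pos h, ih (n / 2) (Nat.div_lt_self (by omega) (by omega)),
        Nat.log_of_one_lt_of_le (by omega) h]
      push_cast; ring
    · rw [if_neg h, Nat.log_of_lt (by omega)]
      simp

-- ===== VERDICT (by name: the statement is the Claim_ definition above) =====
theorem i4_log_2_spec : Claim_equal_i4_log_2 := by
  intro i _
  unfold Spec_i4_log_2 i4_log_2 i4_log_2_alt
  by_cases h : i = 0
  · simp [h]
  · simp [h, i4_log_2_loop_eq]
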